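-- pv_equiv track=rewrite | github.com/eugenetyc/cs3245hw4 | search.py | merge_positions
-- ===== SOURCE A (Python) =====
-- def merge_positions(positions1, positions2, doc_id):
--     merged_positions = []
--     L1 = len(positions1)
--     L2 = len(positions2)
--     index1, index2 = 0, 0
--     offset1, offset2 = 0, 0
--     # This is for our gap encoding
--     last_position_of_merged_list = 0
--     # Do this because we have byte encoding
--     calculate_actual_pos_from_offset = lambda curr_value, offset: curr_value + offset
--     while index1 < L1 and index2 < L2:
--         proper_position2 = calculate_actual_pos_from_offset(positions2[index2], offset2)
--         if calculate_actual_pos_from_offset(positions1[index1], offset1) + 1 == proper_position2: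
--             # Only merge the position of index2 because
--             # We only need the position of the preceeding term
--             # Need to do some math now because of our gap encoding, sadly
--             position_to_append = proper_position2 - last_position_of_merged_list
--             last_position_of_merged_list = proper_position2
--             merged_positions.append(position_to_append)
--
--             # Update the offsets of the original two positing lists
--             offset1 += positions1[index1]
--             offset2 += positions2[index2]
--             index1 += 1
--             index2 += 1
--         elif calculate_actual_pos_from_offset(positions1[index1], offset1) + 1 > proper_position2:
--             offset2 += positions2[index2]
--             index2 += 1
--         else:
--             offset1 += positions1[index1]
--             index1 += 1
--     return merged_positions
-- ===== SOURCE B (Python) =====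
-- def merge_positions(positions1, positions2, doc_id):
--     # Decode each gap-encoded list into absolute positions (cumulative sums).
--     absolutes1 = []
--     total = 0
--     for gap in positions1:
--         total += gap
--         absolutes1.append(total)
--     absolutes2 = []
--     total = 0
--     for gap in positions2:
--         total += gap
--         absolutes2.append(total)
--     # Match on absolute positions: keep each position of list2 directly preceded
--     # by a position of list1, advancing past whichever side is behind.
--     matched = []
--     i, j = 0, 0
--     while i < len(absolutes1) and j < len(absolutes2):
--         if absolutes1[i] + 1 == absolutes2[j]:
--             matched.append(absolutes2[j])
--             i += 1
--             j += 1
--         elif absolutes1[i] + 1 > absolutes2[j]: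
--             j += 1
--         else:
--             i += 1
--     # Re-gap-encode the matched absolute positions.
--     result = []
--     last = 0
--     for pos in matched:
--         result.append(pos - last)
--         last = pos
--     return result
-- ===== Notes on version B (the rewrite author's own statement) =====
-- stated objective: simpler
-- what changed: Replaces A's single stateful loop that interleaves gap decoding (running offsets), matching and inline re-gap-encoding with four counters and a per-iteration lambda by four plain phases over a different representation: decode both lists to absolute positions, match on the absolute values, then re-gap-encode the matches in a final pass.
import Mathlib
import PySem

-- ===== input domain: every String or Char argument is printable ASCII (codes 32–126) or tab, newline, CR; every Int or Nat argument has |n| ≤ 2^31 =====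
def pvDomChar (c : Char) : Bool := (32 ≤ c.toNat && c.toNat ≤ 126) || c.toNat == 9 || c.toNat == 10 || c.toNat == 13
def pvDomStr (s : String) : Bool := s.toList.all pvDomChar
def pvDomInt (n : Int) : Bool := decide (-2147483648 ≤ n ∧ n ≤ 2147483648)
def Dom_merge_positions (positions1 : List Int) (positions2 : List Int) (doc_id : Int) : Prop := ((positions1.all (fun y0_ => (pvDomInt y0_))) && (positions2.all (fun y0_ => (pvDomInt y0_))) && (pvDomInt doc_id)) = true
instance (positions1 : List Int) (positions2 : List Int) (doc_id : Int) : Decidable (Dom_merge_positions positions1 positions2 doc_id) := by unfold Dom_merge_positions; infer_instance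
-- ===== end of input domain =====

-- B restructures A's single fused loop (running offsets, inline gap re-encoding, four counters,
-- a per-iteration lambda) into four plain phases: decode both lists to absolute positions, match,
-- re-gap-encode; same cost, simpler.

-- ===== PORT A =====
-- A's while loop over (index1, index2): each iteration consumes the head of one or both lists,
-- carrying (offset1, offset2, last_position_of_merged_list); transcribed as recursion on the lists.
def mergeLoopA : List Int → List Int → Int → Int → Int → List Int
  | [], _, _, _, _ => []
  | _ :: _, [], _, _, _ => []
  | p1 :: r1, p2 :: r2, o1, o2, last =>
    let proper2 := p2 + o2
    if p1 + o1 + 1 = proper2 then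
      (proper2 - last) :: mergeLoopA r1 r2 (o1 + p1) (o2 + p2) proper2
    else if p1 + o1 + 1 > proper2 then
      mergeLoopA (p1 :: r1) r2 o1 (o2 + p2) last
    else
      mergeLoopA r1 (p2 :: r2) (o1 + p1) o2 last
  termination_by l1 l2 => l1.length + l2.length
  decreasing_by all_goals simp only [List.length_cons]; omega

def merge_positions (positions1 : List Int) (positions2 : List Int) (doc_id : Int) : List Int :=
  mergeLoopA positions1 positions2 0 0 0

-- ===== PORT B =====
-- decode phase: absolute positions of a gap list (cumulative sums from total)
def decodeAbsB : List Int → Int → List Int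
  | [], _ => []
  | g :: r, total => (total + g) :: decodeAbsB r (total + g)

-- match phase: positions of the second list directly preceded by one of the first
def matchAbsB : List Int → List Int → List Int
  | [], _ => []
  | _ :: _, [] => []
  | a1 :: r1, a2 :: r2 =>
    if a1 + 1 = a2 then a2 :: matchAbsB r1 r2
    else if a1 + 1 > a2 then matchAbsB (a1 :: r1) r2
    else matchAbsB r1 (a2 :: r2)
  termination_by l1 l2 => l1.length + l2.length
  decreasing_by all_goals simp only [List.length_cons]; omega

-- re-encode phase: gap-encode the matched absolute positions
def reencodeB : List Int → Int → List Int
  | [], _ => []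
  | p :: r, last => (p - last) :: reencodeB r p

def merge_positions_alt (positions1 : List Int) (positions2 : List Int) (_doc_id : Int) : List Int :=
  reencodeB (matchAbsB (decodeAbsB positions1 0) (decodeAbsB positions2 0)) 0

-- ===== PRECONDITION & SPEC =====
def Spec_merge_positions (positions1 : List Int) (positions2 : List Int) (doc_id : Int) (out : List Int) : Prop := out = merge_positions_alt positions1 positions2 doc_id
instance (positions1 : List Int) (positions2 : List Int) (doc_id : Int) (out : List Int) : Decidable (Spec_merge_positions positions1 positions2 doc_id out) := by unfold Spec_merge_positions; infer_instance

-- ===== CLAIM (what is proved, stated in full; the proofs are below) =====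
def Claim_equal_merge_positions : Prop := ∀ (positions1 : List Int) (positions2 : List Int) (doc_id : Int), Dom_merge_positions positions1 positions2 doc_id → Spec_merge_positions positions1 positions2 doc_id (merge_positions positions1 positions2 doc_id)

-- ===== LEMMAS AND PROOFS =====

-- A's fused loop equals B's phases for arbitrary offsets and running 'last'
theorem mergeLoopA_eq (l1 l2 : List Int) (o1 o2 last : Int) :
    mergeLoopA l1 l2 o1 o2 last =
      reencodeB (matchAbsB (decodeAbsB l1 o1) (decodeAbsB l2 o2)) last := by
  fun_induction mergeLoopA l1 l2 o1 o2 last with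
  | case1 l2 o1 o2 last => simp [decodeAbsB, matchAbsB, reencodeB]
  | case2 p1 r1 o1 o2 last => simp [decodeAbsB, matchAbsB, reencodeB]
  | case3 p1 r1 p2 r2 o1 o2 last proper2 heq ih =>
    have hc : o1 + p1 + 1 = o2 + p2 := by simp only [proper2] at heq; omega
    simp only [decodeAbsB, matchAbsB, if_pos hc, reencodeB, proper2]
    rw [ih]
    simp only [proper2]
    have hpo : p2 + o2 = o2 + p2 := by ring
    rw [hpo]
  | case4 p1 r1 p2 r2 o1 o2 last proper2 hne hgt ih =>
    have hc : ¬ o1 + p1 + 1 = o2 + p2 := by simp only [proper2] at hne; omega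
    have hc' : o1 + p1 + 1 > o2 + p2 := by simp only [proper2] at hgt; omega
    simp only [decodeAbsB, matchAbsB, if_neg hc, if_pos hc']
    have := ih
    simp only [decodeAbsB] at this
    exact this
  | case5 p1 r1 p2 r2 o1 o2 last proper2 hne hle ih =>
    have hc : ¬ o1 + p1 + 1 = o2 + p2 := by simp only [proper2] at hne; omega
    have hc' : ¬ o1 + p1 + 1 > o2 + p2 := by simp only [proper2] at hle; omega
    simp only [decodeAbsB, matchAbsB, if_neg hc, if_neg hc']
    have := ih
    simp only [decodeAbsB] at this
    exact this

-- ===== VERDICT (by name: the statement is the Claim_ definition above) =====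
theorem merge_positions_spec : Claim_equal_merge_positions := by
  intro p1 p2 doc_id _hdom
  unfold Spec_merge_positions merge_positions merge_positions_alt
  exact mergeLoopA_eq p1 p2 0 0 0
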